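-- pv_equiv track=rewrite | github.com/tacowasabii/online-judge | 프로그래머스/1/133499. 옹알이 （2）/옹알이 （2）.py | solution
-- ===== SOURCE A (Python) =====
-- def solution(babbling):
--     prs = ["aya", "ye", "woo", "ma"]
--     cnt = 0
--
--     for word in babbling:
--         prev_pr = ""
--         i = 0
--         while i < len(word):
--             found = False
--             for pr in prs:
--                 if word[i:].startswith(pr) and prev_pr != pr:
--                     prev_pr = pr
--                     i += len(pr)
--                     found = True
--             if not found:
--                 break
--         if i == len(word):
--             cnt += 1
--
--     return cnt
-- ===== SOURCE B (Python) =====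
-- def solution(babbling):
--     prs = ("aya", "ye", "woo", "ma")
--     cnt = 0
--     for word in babbling:
--         # pass 1: pure greedy tokenization (the four sounds start with
--         # distinct letters, so at most one can match at any position)
--         toks = []
--         i = 0
--         full = True
--         while i < len(word):
--             for pr in prs:
--                 if word.startswith(pr, i):
--                     toks.append(pr)
--                     i += len(pr)
--                     break
--             else:
--                 full = False
--                 break
--         # pass 2: verify full consumption and no two equal adjacent tokens
--         if full and all(a != b for a, b in zip(toks, toks[1:])):
--             cnt += 1
--     return cnt
-- ===== Notes on version B (the rewrite author's own statement) =====
-- stated objective: simpler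
-- what changed: B separates the work into two passes per word: a pure greedy tokenizer (one matching sound per step, for/break) that records the token list and whether the word was fully consumed, followed by an independent no-equal-adjacent-tokens check over the token list, instead of A's single interleaved while loop that threads a prev_pr blocker through a no-break inner for that may consume several tokens per iteration.
import Mathlib
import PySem

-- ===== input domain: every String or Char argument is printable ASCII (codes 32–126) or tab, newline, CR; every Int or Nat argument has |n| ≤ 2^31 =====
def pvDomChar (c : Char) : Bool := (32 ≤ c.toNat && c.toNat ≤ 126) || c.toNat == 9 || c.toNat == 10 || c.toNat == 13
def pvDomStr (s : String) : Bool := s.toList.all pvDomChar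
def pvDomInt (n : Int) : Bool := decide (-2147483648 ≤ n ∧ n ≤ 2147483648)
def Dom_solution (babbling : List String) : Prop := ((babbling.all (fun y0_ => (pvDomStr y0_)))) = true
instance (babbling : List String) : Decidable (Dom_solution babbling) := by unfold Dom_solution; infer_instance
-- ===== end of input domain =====

-- B replaces A's interleaved loop (a prev_pr blocker threaded through a no-break inner for that can
-- consume several sounds per while iteration) by two separate passes per word: a pure greedy
-- tokenizer (for/break), then an independent adjacent-tokens-distinct check; objective: simpler.

-- ===== PORT A =====
-- the four sounds, as lists of chars (Python str → List Char)
def pvPrs : List (List Char) := [['a', 'y', 'a'], ['y', 'e'], ['w', 'o', 'o'], ['m', 'a']]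

-- one iteration of A's inner `for pr in prs` (state = (prev_pr, i, found));
-- word[i:].startswith(pr) is List.isPrefixOf on List.drop (exact: i is a non-negative index)
def pvStepA (w : List Char) : (List Char × Nat × Bool) → List Char → (List Char × Nat × Bool)
  | (prev, i, found), pr =>
    if pr.isPrefixOf (w.drop i) ∧ prev ≠ pr then (pr, i + pr.length, true)
    else (prev, i, found)

-- the fold never decreases i, and if it turned `found` on, it strictly increased i
-- (used only for termination of pvLoopA)
lemma pvFoldA_bounds (l : List (List Char)) (hl : ∀ pr ∈ l, 0 < pr.length)
    (w : List Char) (st : List Char × Nat × Bool) :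
    st.2.1 ≤ (l.foldl (pvStepA w) st).2.1 ∧
      ((l.foldl (pvStepA w) st).2.2 = true → st.2.2 = true ∨ st.2.1 < (l.foldl (pvStepA w) st).2.1) := by
  induction l generalizing st with
  | nil => simp
  | cons pr l ih =>
    have hpr : 0 < pr.length := hl pr (by simp)
    have hl' : ∀ q ∈ l, 0 < q.length := fun q hq => hl q (by simp [hq])
    obtain ⟨prev, i, f⟩ := st
    simp only [List.foldl_cons, pvStepA]
    split
    · have h1 : i + pr.length ≤ (List.foldl (pvStepA w) (pr, i + pr.length, true) l).2.1 :=
        (ih hl' (pr, i + pr.length, true)).1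
      exact ⟨by omega, fun _ => Or.inr (by omega)⟩
    · exact ih hl' (prev, i, f)

-- A's `while i < len(word)` loop; returns the final i
def pvLoopA (w : List Char) (prev : List Char) (i : Nat) : Nat :=
  if _h : i < w.length then
    match hr : pvPrs.foldl (pvStepA w) (prev, i, false) with
    | (p', i', f) => if f then pvLoopA w p' i' else i
  else i
termination_by w.length - i
decreasing_by
  have hb := pvFoldA_bounds pvPrs (by decide) w (prev, i, false)
  rw [hr] at hb
  rcases hb.2 (by assumption) with h | h
  · exact absurd h (by simp)
  · have h' : i < i' := h
    omega

def solution (babbling : List String) : Int :=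
  babbling.foldl (fun cnt word =>
    let w := word.toList
    if pvLoopA w [] 0 = w.length then cnt + 1 else cnt) 0

-- ===== PORT B =====
-- B's tokenizer: repeatedly take the (unique) matching sound off the front of the word;
-- returns (token list, fully-consumed flag).  The for/break over prs is List.find?.
def pvTokB (w : List Char) : List (List Char) × Bool :=
  if _hw : w = [] then ([], true)
  else
    match hm : pvPrs.find? (fun pr => pr.isPrefixOf w) with
    | some pr =>
      match pvTokB (w.drop pr.length) with
      | (ts, f) => (pr :: ts, f)
    | none => ([], false)
termination_by w.length
decreasing_by
  have hp : pr ∈ pvPrs := List.mem_of_find?_eq_some hm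
  have h1 : 0 < pr.length := (by decide : ∀ q ∈ pvPrs, 0 < q.length) pr hp
  have h2 : 0 < w.length := List.length_pos_iff.mpr (by assumption)
  simp only [List.length_drop]; omega

-- all(a != b for a, b in zip(toks, toks[1:]))
def pvZipAll (toks : List (List Char)) : Bool :=
  (toks.zip toks.tail).all (fun p => decide (p.1 ≠ p.2))

def solution_alt (babbling : List String) : Int :=
  babbling.foldl (fun cnt word =>
    match pvTokB word.toList with
    | (toks, full) => if full && pvZipAll toks then cnt + 1 else cnt) 0

-- ===== PRECONDITION & SPEC =====
def Spec_solution (babbling : List String) (out : Int) : Prop := out = solution_alt babbling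
instance (babbling : List String) (out : Int) : Decidable (Spec_solution babbling out) := by unfold Spec_solution; infer_instance

-- ===== CLAIM (what is proved, stated in full; the proofs are below) =====
def Claim_equal_solution : Prop := ∀ (babbling : List String), Dom_solution babbling → Spec_solution babbling (solution babbling)

-- ===== LEMMAS AND PROOFS =====

-- proof-side view of A's loop: accept from state (prev, suffix), one token per step
def pvOkR (prev : List Char) (w : List Char) : Bool :=
  if _hw : w = [] then true
  else
    match hm : pvPrs.find? (fun pr => pr.isPrefixOf w) with
    | some pr => if pr ≠ prev then pvOkR pr (w.drop pr.length) else false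
    | none => false
termination_by w.length
decreasing_by
  have hp : pr ∈ pvPrs := List.mem_of_find?_eq_some hm
  have h1 : 0 < pr.length := (by decide : ∀ q ∈ pvPrs, 0 < q.length) pr hp
  have h2 : 0 < w.length := List.length_pos_iff.mpr (by assumption)
  simp only [List.length_drop]; omega

-- the four sounds start with distinct letters: a matching sound is THE find? result
lemma pvUniq (pr : List Char) (hp : pr ∈ pvPrs) (w : List Char)
    (h : pr.isPrefixOf w = true) : pvPrs.find? (fun q => q.isPrefixOf w) = some pr := by
  simp only [pvPrs, List.mem_cons, List.not_mem_nil, or_false] at hp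
  obtain ⟨t, rfl⟩ := List.isPrefixOf_iff_prefix.mp h
  rcases hp with rfl | rfl | rfl | rfl <;>
    simp [pvPrs, List.find?, List.isPrefixOf]

-- unfolding pvOkR at a nonempty suffix whose head sound is pr, with pr ≠ prev
lemma pvOkR_step (prev pr : List Char) (w : List Char) (hp : pr ∈ pvPrs)
    (hpre : pr.isPrefixOf w = true) (hne : pr ≠ prev) :
    pvOkR prev w = pvOkR pr (w.drop pr.length) := by
  have hpl : 0 < pr.length := (by decide : ∀ q ∈ pvPrs, 0 < q.length) pr hp
  have hwne : w ≠ [] := by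
    intro he
    rw [he] at hpre
    cases pr with
    | nil => simp at hpl
    | cons a t => simp [List.isPrefixOf] at hpre
  rw [pvOkR, dif_neg hwne]
  split
  · next q hq =>
    rw [pvUniq pr hp w hpre] at hq
    cases hq
    rw [if_pos hne]
  · next hq =>
    rw [pvUniq pr hp w hpre] at hq
    cases hq

-- pvOkR rejects a nonempty suffix on which A's inner for finds nothing usable
lemma pvOkR_stuck (prev : List Char) (w : List Char) (hwne : w ≠ [])
    (hneg : ∀ pr ∈ pvPrs, ¬(pr.isPrefixOf w = true ∧ prev ≠ pr)) :
    pvOkR prev w = false := by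
  rw [pvOkR, dif_neg hwne]
  split
  · next q hq =>
    have hqm : q ∈ pvPrs := List.mem_of_find?_eq_some hq
    have hqp : q.isPrefixOf w = true := by simpa using List.find?_some hq
    have hqq : q = prev := by
      by_contra hne
      exact hneg q hqm ⟨hqp, fun he => hne he.symm⟩
    rw [if_neg (by simp [hqq])]
  · rfl

-- core invariant of A's inner for-fold: either nothing fired, or found=true, i strictly
-- increased (staying ≤ |w|) and acceptance from the state is preserved
lemma pvFoldA_char (l : List (List Char)) (hl : ∀ pr ∈ l, pr ∈ pvPrs)
    (w : List Char) (prev : List Char) (i : Nat) (f : Bool) (hi : i ≤ w.length) :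
    (l.foldl (pvStepA w) (prev, i, f) = (prev, i, f) ∧
      ∀ pr ∈ l, ¬(pr.isPrefixOf (w.drop i) = true ∧ prev ≠ pr)) ∨
    (i < (l.foldl (pvStepA w) (prev, i, f)).2.1 ∧
      (l.foldl (pvStepA w) (prev, i, f)).2.1 ≤ w.length ∧
      (l.foldl (pvStepA w) (prev, i, f)).2.2 = true ∧
      pvOkR prev (w.drop i) = pvOkR (l.foldl (pvStepA w) (prev, i, f)).1
        (w.drop (l.foldl (pvStepA w) (prev, i, f)).2.1)) := by
  induction l generalizing prev i f with
  | nil => left; simp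
  | cons pr l ih =>
    have hpr : pr ∈ pvPrs := hl pr (by simp)
    have hl' : ∀ q ∈ l, q ∈ pvPrs := fun q hq => hl q (by simp [hq])
    simp only [List.foldl_cons, pvStepA]
    split
    · next hc =>
      have hpl : 0 < pr.length := (by decide : ∀ q ∈ pvPrs, 0 < q.length) pr hpr
      have hle : pr.length ≤ w.length - i := by
        have := (List.isPrefixOf_iff_prefix.mp hc.1).length_le
        simpa [List.length_drop] using this
      have hi' : i + pr.length ≤ w.length := by omega
      have hok : pvOkR prev (w.drop i) = pvOkR pr (w.drop (i + pr.length)) := by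
        have h1 := pvOkR_step prev pr (w.drop i) hpr hc.1 (fun he => hc.2 he.symm)
        rwa [List.drop_drop] at h1
      rcases ih hl' pr (i + pr.length) true hi' with ⟨heq, _⟩ | ⟨h1, h2, h3, h4⟩
      · right
        rw [heq]
        refine ⟨?_, ?_, rfl, ?_⟩
        · show i < i + pr.length
          omega
        · show i + pr.length ≤ w.length
          exact hi'
        · show pvOkR prev (w.drop i) = pvOkR pr (w.drop (i + pr.length))
          exact hok
      · right
        exact ⟨by omega, h2, h3, hok.trans h4⟩
    · next hc =>
      rcases ih hl' prev i f hi with ⟨heq, hneg⟩ | h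
      · left
        refine ⟨heq, fun q hq => ?_⟩
        rcases List.mem_cons.mp hq with rfl | hq'
        · exact fun hx => hc ⟨hx.1, hx.2⟩
        · exact hneg q hq'
      · right
        exact h

-- A's while loop reaches len(word) iff pvOkR accepts the suffix
lemma pvLoopA_iff (n : Nat) (w : List Char) (prev : List Char) (i : Nat)
    (hi : i ≤ w.length) (hn : w.length - i ≤ n) :
    (pvLoopA w prev i = w.length ↔ pvOkR prev (w.drop i) = true) := by
  induction n generalizing prev i with
  | zero =>
    have he : i = w.length := by omega
    subst he
    rw [pvLoopA, dif_neg (by omega)]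
    simp [List.drop_length, pvOkR]
  | succ n ih =>
    by_cases hlt : i < w.length
    · rw [pvLoopA, dif_pos hlt]
      split
      · next p' i' f hr =>
        rcases pvFoldA_char pvPrs (fun q hq => hq) w prev i false (by omega) with
          ⟨heq, hneg⟩ | ⟨h1, h2, h3, h4⟩
        · rw [heq] at hr
          obtain ⟨rfl, rfl, rfl⟩ : prev = p' ∧ i = i' ∧ false = f := by
            injection hr with e1 e2; injection e2 with e3 e4; exact ⟨e1, e3, e4⟩
          simp only [Bool.false_eq_true, if_false]
          have hstuck : pvOkR prev (w.drop i) = false := by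
            apply pvOkR_stuck
            · intro hdrop
              have : w.length - i = 0 := by
                have := congrArg List.length hdrop
                simpa [List.length_drop] using this
              omega
            · exact hneg
          rw [hstuck]
          constructor
          · intro h; omega
          · intro h; cases h
        · rw [hr] at h1 h2 h3 h4
          simp only at h1 h2 h3 h4
          rw [h3, if_pos rfl]
          rw [h4]
          exact ih p' i' h2 (by omega)
    · have he : i = w.length := by omega
      subst he
      rw [pvLoopA, dif_neg (by omega)]
      simp [List.drop_length, pvOkR]

-- adjacency checker threaded with the previous token
def pvAdj : List Char → List (List Char) → Bool
  | _, [] => true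
  | prev, t :: ts => decide (t ≠ prev) && pvAdj t ts

-- unfolding equations for the tokenizer
lemma pvTokB_nil : pvTokB [] = ([], true) := by
  rw [pvTokB]; simp

lemma pvTokB_none (w : List Char) (hwne : w ≠ [])
    (h : pvPrs.find? (fun pr => pr.isPrefixOf w) = none) : pvTokB w = ([], false) := by
  rw [pvTokB, dif_neg hwne]
  split
  · next q hq => rw [h] at hq; cases hq
  · rfl

lemma pvTokB_some (w : List Char) (hwne : w ≠ []) (pr : List Char)
    (h : pvPrs.find? (fun pr => pr.isPrefixOf w) = some pr) :
    pvTokB w = (pr :: (pvTokB (w.drop pr.length)).1, (pvTokB (w.drop pr.length)).2) := by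
  rw [pvTokB, dif_neg hwne]
  split
  · next q hq =>
    rw [h] at hq
    cases hq
    rcases pvTokB (w.drop pr.length) with ⟨ts, f⟩
    rfl
  · next hq => rw [h] at hq; cases hq

-- unfolding equations for pvOkR
lemma pvOkR_nil (prev : List Char) : pvOkR prev [] = true := by
  rw [pvOkR]; simp

lemma pvOkR_none (prev : List Char) (w : List Char) (hwne : w ≠ [])
    (h : pvPrs.find? (fun pr => pr.isPrefixOf w) = none) : pvOkR prev w = false := by
  rw [pvOkR, dif_neg hwne]
  split
  · next q hq => rw [h] at hq; cases hq
  · rfl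

lemma pvOkR_some (prev : List Char) (w : List Char) (hwne : w ≠ []) (pr : List Char)
    (h : pvPrs.find? (fun pr => pr.isPrefixOf w) = some pr) :
    pvOkR prev w = if pr ≠ prev then pvOkR pr (w.drop pr.length) else false := by
  rw [pvOkR, dif_neg hwne]
  split
  · next q hq => rw [h] at hq; cases hq; rfl
  · next hq => rw [h] at hq; cases hq

-- pvOkR = tokenize fully ∧ adjacent tokens (and the first one vs prev) distinct
lemma pvOkR_tokB (n : Nat) (w : List Char) (hn : w.length ≤ n) (prev : List Char) :
    pvOkR prev w = ((pvTokB w).2 && pvAdj prev (pvTokB w).1) := by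
  induction n generalizing w prev with
  | zero =>
    have hwe : w = [] := by
      cases w with
      | nil => rfl
      | cons a t => simp at hn
    subst hwe
    rw [pvOkR_nil, pvTokB_nil]
    simp [pvAdj]
  | succ n ih =>
    by_cases hwe : w = []
    · subst hwe
      rw [pvOkR_nil, pvTokB_nil]
      simp [pvAdj]
    · rcases hfind : pvPrs.find? (fun pr => pr.isPrefixOf w) with _ | pr
      · rw [pvOkR_none prev w hwe hfind, pvTokB_none w hwe hfind]
        simp
      · have hqm : pr ∈ pvPrs := List.mem_of_find?_eq_some hfind
        have hpl : 0 < pr.length := (by decide : ∀ q ∈ pvPrs, 0 < q.length) pr hqm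
        have hwl : 0 < w.length := List.length_pos_iff.mpr hwe
        have hrec := ih (w.drop pr.length) (by simp only [List.length_drop]; omega) pr
        rw [pvOkR_some prev w hwe pr hfind, pvTokB_some w hwe pr hfind]
        simp only
        by_cases hne : pr ≠ prev
        · rw [if_pos hne, hrec]
          simp [pvAdj, hne]
        · rw [if_neg hne]
          simp [pvAdj, Decidable.not_not.mp hne]

-- every token produced by the tokenizer is one of the four sounds
lemma pvTokB_mem (n : Nat) (w : List Char) (hn : w.length ≤ n) :
    ∀ t ∈ (pvTokB w).1, t ∈ pvPrs := by
  induction n generalizing w with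
  | zero =>
    have hwe : w = [] := by
      cases w with
      | nil => rfl
      | cons a t => simp at hn
    subst hwe
    rw [pvTokB_nil]
    simp
  | succ n ih =>
    by_cases hwe : w = []
    · subst hwe; rw [pvTokB_nil]; simp
    · rcases hfind : pvPrs.find? (fun pr => pr.isPrefixOf w) with _ | pr
      · rw [pvTokB_none w hwe hfind]; simp
      · have hqm : pr ∈ pvPrs := List.mem_of_find?_eq_some hfind
        have hpl : 0 < pr.length := (by decide : ∀ q ∈ pvPrs, 0 < q.length) pr hqm
        have hwl : 0 < w.length := List.length_pos_iff.mpr hwe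
        have hrec := ih (w.drop pr.length) (by simp only [List.length_drop]; omega)
        rw [pvTokB_some w hwe pr hfind]
        intro t ht
        rcases List.mem_cons.mp ht with rfl | ht'
        · exact hqm
        · exact hrec t ht'

-- the threaded checker with a non-token seed is the plain zip-adjacent check
lemma pvAdj_zip (ts : List (List Char)) (t : List Char) :
    pvAdj t ts = pvZipAll (t :: ts) := by
  induction ts generalizing t with
  | nil => simp [pvAdj, pvZipAll]
  | cons u r ih =>
    simp only [pvAdj, pvZipAll, List.zip, List.tail, List.zipWith, List.all_cons]
    rw [show pvAdj u r = pvZipAll (u :: r) from ih u]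
    simp only [pvZipAll, List.zip, List.tail]
    have : (decide (u ≠ t)) = (decide (t ≠ u)) := by
      simp [ne_comm]
    rw [this]

-- per-word equivalence: A's loop consumes the word iff B's two checks pass
lemma pvWord (w : List Char) :
    (pvLoopA w [] 0 = w.length) ↔ ((pvTokB w).2 && pvZipAll (pvTokB w).1) = true := by
  have h0 := pvLoopA_iff w.length w [] 0 (by omega) (by omega)
  rw [List.drop_zero] at h0
  rw [h0, pvOkR_tokB w.length w le_rfl []]
  rcases hts : (pvTokB w).1 with _ | ⟨t, ts⟩
  · simp [pvAdj, pvZipAll]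
  · have htm : t ∈ pvPrs := pvTokB_mem w.length w le_rfl t (by rw [hts]; simp)
    have htne : t ≠ [] := by
      intro he; rw [he] at htm; exact absurd htm (by decide)
    have h1 : pvAdj [] (t :: ts) = pvZipAll (t :: ts) := by
      simp only [pvAdj]
      rw [pvAdj_zip ts t]
      simp [htne]
    rw [h1]

-- the two per-word counting steps are the same function
lemma pvStep_eq :
    (fun (cnt : Int) (word : String) =>
      let w := word.toList
      if pvLoopA w [] 0 = w.length then cnt + 1 else cnt)
    = (fun (cnt : Int) (word : String) =>
      match pvTokB word.toList with
      | (toks, full) => if full && pvZipAll toks then cnt + 1 else cnt) := by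
  funext cnt word
  have hw := pvWord word.toList
  rcases hr : pvTokB word.toList with ⟨toks, full⟩
  rw [hr] at hw
  simp only at hw ⊢
  by_cases h : pvLoopA word.toList [] 0 = word.toList.length
  · rw [if_pos h, if_pos (hw.mp h)]
  · rw [if_neg h, if_neg (fun hc => h (hw.mpr hc))]

-- ===== VERDICT (by name: the statement is the Claim_ definition above) =====
theorem solution_spec : Claim_equal_solution := by
  intro babbling _
  unfold Spec_solution solution solution_alt
  rw [pvStep_eq]
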